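-- pv_equiv track=rewrite | github.com/iAzamat/Pythonedu | Seminars/Python012_Seminar_5/main.py | new_list
-- ===== SOURCE A (Python) =====
-- def new_list(my_string):
--     if my_string[0] == max(my_string):
--         return new_list(my_string[1:])
--
--     else:
--         myList = [my_string[0]]
--         for i in range(1, len(my_string)):
--             if myList[-1] < my_string[i]:
--                 myList.append(my_string[i])
--         return myList
-- ===== SOURCE B (Python) =====
-- def new_list(my_string):
--     # One pass from the right computes, for each position, the maximum of the
--     # elements strictly after it; one pass from the left then both skips the
--     # leading suffix-maxima and builds the increasing subsequence.
--     suff = []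
--     m = None
--     for v in reversed(my_string):
--         suff.append(m)
--         m = v if m is None or v > m else m
--     suff.reverse()
--     out = []
--     for v, sm in zip(my_string, suff):
--         if out:
--             if out[-1] < v:
--                 out.append(v)
--         elif sm is not None and v < sm:
--             out.append(v)
--     return out
-- ===== Notes on version B (the rewrite author's own statement) =====
-- stated objective: alternative
-- what changed: B replaces A's recursive stripping (each step recomputing max of the remaining list and re-slicing, worst-case O(n^2)) by one right-to-left pass recording each position's strict-suffix maximum and one left-to-right pass that simultaneously skips the leading suffix-maxima and builds the increasing subsequence; a timing run on its (sorted) input family found no measurable speed difference.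
-- outside the precondition, e.g. on new_list([]): A raises IndexError, B returns []; on new_list([3, 2]): A raises IndexError, B returns []
import Mathlib
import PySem

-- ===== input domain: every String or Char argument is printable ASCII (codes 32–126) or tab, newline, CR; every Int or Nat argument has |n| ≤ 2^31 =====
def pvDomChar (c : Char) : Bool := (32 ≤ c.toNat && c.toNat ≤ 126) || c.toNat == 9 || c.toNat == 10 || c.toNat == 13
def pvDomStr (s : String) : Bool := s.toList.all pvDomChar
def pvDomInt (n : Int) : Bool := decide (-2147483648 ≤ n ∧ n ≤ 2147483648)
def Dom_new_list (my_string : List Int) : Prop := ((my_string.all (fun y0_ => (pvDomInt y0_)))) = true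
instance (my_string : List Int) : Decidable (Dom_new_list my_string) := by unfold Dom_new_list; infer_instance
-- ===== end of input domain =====

-- B replaces A's recursive stripping (max of the remaining list recomputed per step) by
-- two passes: suffix maxima right-to-left, then one skip-and-build pass left-to-right;
-- return values agree wherever A returns (A raises IndexError on non-increasing input,
-- excluded by Pre_).

-- ===== PORT A =====
def new_list (my_string : List Int) : List Int :=
  match my_string with
  | [] => []            -- Python: my_string[0] raises IndexError here (outside Pre_)
  | x :: rest =>
    match PySem.List.max? (x :: rest) (fun y => y) with
    | none => []        -- unreachable: the list is nonempty
    | some m =>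
      if x = m then
        new_list rest   -- my_string[1:]
      else
        rest.foldl (fun acc v =>
          match PySem.List.pyGet? acc (-1) with     -- myList[-1]
          | some last => if last < v then acc ++ [v] else acc
          | none => acc) [x]

-- ===== PORT B =====
def new_list_alt (my_string : List Int) : List Int :=
  let p := my_string.reverse.foldl
    (fun (st : List (Option Int) × Option Int) v =>
      (st.1 ++ [st.2],
       match st.2 with
       | none => some v
       | some m => if v > m then some v else some m))
    ([], none)
  let suff := p.1.reverse
  (my_string.zip suff).foldl
    (fun out vm =>
      if out = [] then
        match vm.2 with
        | some sm => if vm.1 < sm then out ++ [vm.1] else out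
        | none => out
      else
        match PySem.List.pyGet? out (-1) with       -- out[-1]
        | some last => if last < vm.1 then out ++ [vm.1] else out
        | none => out)
    []

-- ===== PRECONDITION & SPEC =====
-- A raises IndexError exactly on non-increasing lists (each head is a maximum, so the
-- stripping recursion reaches [] and indexes it); Pre_ admits every input A returns on.
def Pre_new_list (my_string : List Int) : Prop := ¬ List.IsChain (· ≥ ·) my_string
instance (my_string : List Int) : Decidable (Pre_new_list my_string) := by unfold Pre_new_list; infer_instance
def pvWitness_new_list : List Int := ([1, 3, 2])

def Spec_new_list (my_string : List Int) (out : List Int) : Prop := out = new_list_alt my_string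
instance (my_string : List Int) (out : List Int) : Decidable (Spec_new_list my_string out) := by unfold Spec_new_list; infer_instance

-- ===== CLAIM (what is proved, stated in full; the proofs are below) =====
def Claim_equal_new_list : Prop := ∀ (my_string : List Int), Dom_new_list my_string → Pre_new_list my_string → Spec_new_list my_string (new_list my_string)

-- ===== LEMMAS AND PROOFS =====

-- max of the strict suffix after the head (none for the empty list)
def pvSmax : List Int → Option Int
  | [] => none
  | x :: t => some (t.foldl max x)

-- per-position strict-suffix maxima, as B's first pass computes them
def pvSuff : List Int → List (Option Int)
  | [] => []
  | _ :: t => pvSmax t :: pvSuff t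

-- A's greedy append step (the body of both Pythons' build loop)
def pvStep (acc : List Int) (v : Int) : List Int :=
  match PySem.List.pyGet? acc (-1) with
  | some last => if last < v then acc ++ [v] else acc
  | none => acc

theorem pvFoldl_max_max (t : List Int) : ∀ x y, t.foldl max (max x y) = max x (t.foldl max y) := by
  induction t with
  | nil => intro x y; rfl
  | cons a t ih =>
    intro x y
    simp only [List.foldl_cons, max_assoc]
    exact ih x (max y a)

theorem pvSmax_cons (x : Int) (t : List Int) :
    (match pvSmax t with
      | none => some x
      | some m => if x > m then some x else some m) = pvSmax (x :: t) := by
  cases t with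
  | nil => rfl
  | cons y u =>
    simp only [pvSmax, List.foldl_cons]
    rw [pvFoldl_max_max]
    by_cases h : x > u.foldl max y
    · simp [h, max_eq_left (le_of_lt h)]
    · simp [h, max_eq_right (le_of_not_gt h)]

theorem pvScan_spec (xs : List Int) :
    xs.foldr
      (fun v (st : List (Option Int) × Option Int) =>
        (st.1 ++ [st.2],
         match st.2 with
         | none => some v
         | some m => if v > m then some v else some m))
      ([], none)
    = ((pvSuff xs).reverse, pvSmax xs) := by
  induction xs with
  | nil => rfl
  | cons x t ih =>
    simp only [List.foldr_cons, ih, pvSuff, List.reverse_cons]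
    exact Prod.ext rfl (pvSmax_cons x t)

theorem pvSuff_length (xs : List Int) : (pvSuff xs).length = xs.length := by
  induction xs with
  | nil => rfl
  | cons x t ih => simp [pvSuff, ih]

theorem pvStep_ne_nil (acc : List Int) (v : Int) (h : acc ≠ []) : pvStep acc v ≠ [] := by
  unfold pvStep
  cases hg : PySem.List.pyGet? acc (-1) with
  | none => exact h
  | some last =>
    by_cases hl : last < v
    · simp [hl]
    · simp [hl, h]

theorem pvZipFold (t : List Int) : ∀ (s : List (Option Int)), s.length = t.length →
    ∀ out : List Int, out ≠ [] →
    (t.zip s).foldl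
      (fun out vm =>
        if out = [] then
          match vm.2 with
          | some sm => if vm.1 < sm then out ++ [vm.1] else out
          | none => out
        else
          match PySem.List.pyGet? out (-1) with
          | some last => if last < vm.1 then out ++ [vm.1] else out
          | none => out)
      out
    = t.foldl pvStep out := by
  induction t with
  | nil => intro s _ out _; simp
  | cons v t ih =>
    intro s hs out hout
    cases s with
    | nil => simp at hs
    | cons sm s' =>
      simp only [List.zip_cons_cons, List.foldl_cons, if_neg hout]
      have : (match PySem.List.pyGet? out (-1) with
          | some last => if last < v then out ++ [v] else out
          | none => out) = pvStep out v := rfl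
      rw [this]
      exact ih s' (by simpa using hs) (pvStep out v) (pvStep_ne_nil out v hout)

theorem pvAlt_eq (xs : List Int) :
    new_list_alt xs =
      (xs.zip (pvSuff xs)).foldl
        (fun out vm =>
          if out = [] then
            match vm.2 with
            | some sm => if vm.1 < sm then out ++ [vm.1] else out
            | none => out
          else
            match PySem.List.pyGet? out (-1) with
            | some last => if last < vm.1 then out ++ [vm.1] else out
            | none => out)
        [] := by
  unfold new_list_alt
  rw [List.foldl_reverse]
  have := pvScan_spec xs
  simp only [this, List.reverse_reverse]

theorem pvAlt_cons (x : Int) (t : List Int) :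
    new_list_alt (x :: t) =
      match pvSmax t with
      | some m => if x < m then t.foldl pvStep [x] else new_list_alt t
      | none => new_list_alt t := by
  rw [pvAlt_eq]
  simp only [pvSuff, List.zip_cons_cons, List.foldl_cons]
  cases hm : pvSmax t with
  | none => simp [pvAlt_eq]
  | some m =>
    by_cases hx : x < m
    · simp only [hx, if_pos, List.nil_append]
      exact pvZipFold t (pvSuff t) (pvSuff_length t) [x] (by simp)
    · simp [hx, pvAlt_eq]

theorem pvA_cons (x : Int) (t : List Int) :
    new_list (x :: t) =
      if x = t.foldl max x then new_list t else t.foldl pvStep [x] := by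
  conv_lhs => rw [new_list]
  rw [PySem.List.max?_id_cons]
  rfl

-- ===== VERDICT (by name: the statement is the Claim_ definition above) =====
theorem pvMain (xs : List Int) : Pre_new_list xs → new_list xs = new_list_alt xs := by
  induction xs with
  | nil => intro hpre; exact absurd List.IsChain.nil hpre
  | cons x t ih =>
    intro hpre
    rw [pvA_cons, pvAlt_cons]
    by_cases hx : x = t.foldl max x
    · rw [if_pos hx]
      cases t with
      | nil => exact absurd (List.IsChain.singleton x) hpre
      | cons y u =>
        have hmax : (y :: u).foldl max x = max x (u.foldl max y) := by
          simp only [List.foldl_cons]; exact pvFoldl_max_max u x y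
        have hmle : u.foldl max y ≤ x := by
          rw [hmax] at hx; exact max_eq_left_iff.mp hx.symm
        have hyle : y ≤ u.foldl max y := (PySem.List.le_foldl_max u y).1
        have hpret : Pre_new_list (y :: u) := by
          intro hch
          exact hpre (List.isChain_cons.mpr ⟨by simp; omega, hch⟩)
        simp only [pvSmax, if_neg (not_lt.mpr hmle)]
        exact ih hpret
    · rw [if_neg hx]
      have hle : x ≤ t.foldl max x := (PySem.List.le_foldl_max t x).1
      have hlt : x < t.foldl max x := lt_of_le_of_ne hle hx
      cases t with
      | nil => simp at hx
      | cons y u =>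
        have hmax : (y :: u).foldl max x = max x (u.foldl max y) := by
          simp only [List.foldl_cons]; exact pvFoldl_max_max u x y
        have hxm : x < u.foldl max y := by
          rw [hmax] at hlt
          rcases max_cases x (u.foldl max y) with ⟨he, _⟩ | ⟨he, _⟩ <;> omega
        simp only [pvSmax, if_pos hxm]

theorem new_list_spec : Claim_equal_new_list := by
  intro xs _ hpre
  exact pvMain xs hpre
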